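-- pv_equiv track=rewrite | github.com/Artexxx/Artem-python | algorithms/Project_Euler/057 - Square root convergents/sol2.py | count_larger_numerator_expansions
-- ===== SOURCE A (Python) =====
-- from typing import Iterable, Tuple
--
-- def calculate_large_sum(number_strings: Iterable[str]) -> str:
--     """Calculate sum of large numbers.
--     Args:
--         number_strings: iterable of numbers as strings to sum up.
--     Returns:
--         The sum of the numbers as string.
--     """
--     number_strings = list(number_strings)
--     large_sum = ''
--     new_digit = True
--     digit_idx = 1
--     remainder = 0
--     while new_digit:
--         new_digit = False
--         current_sum_digit = remainder
--         for number in number_strings: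
--             try:
--                 digit = int(number[-digit_idx])
--                 new_digit = True
--             except IndexError:
--                 digit = 0
--             current_sum_digit += digit
--         large_sum = str(current_sum_digit % 10) + large_sum
--         remainder = current_sum_digit // 10
--         digit_idx += 1
--     if remainder:
--         large_sum = str(remainder) + large_sum
--
--     return large_sum.lstrip('0') or '0'
--
-- def _multiply_large_number_and_digit(number: str, digit: int) -> str:
--     """Multiply a large number (as string) and a digit."""
--     large_product = ''
--     remainder = 0
--     for num_digit in reversed(number):
--         current_product_digit = remainder + int(num_digit) * digit
--         large_product = str(current_product_digit % 10) + large_product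
--         remainder = current_product_digit // 10
--     if remainder:
--         large_product = str(remainder) + large_product
--     return large_product
--
-- def calculate_large_product(number1: str, number2: str, last_n_digits_only: int = 0) -> str:
--     """Multiply two large numbers given as string. The result will be a string as well."""
--     number1 = number1[-last_n_digits_only:]
--     number2 = number2[-last_n_digits_only:]
--     partial_products = []
--     for digit_idx, digit_value in enumerate(reversed(number2)):
--         partial_product = _multiply_large_number_and_digit(number1, int(digit_value)) + \
--             ('0' * digit_idx)
--         partial_products.append(partial_product)
--     return calculate_large_sum(partial_products)[-last_n_digits_only:]
--
-- def get_square_root_expansions() -> Iterable[Tuple[str, str]]: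
--     """Get square root expansions for `sqrt(2)` as tuples `(numerator, denominator)`."""
--     previous_numerator = '1'
--     previous_denominator = '1'
--     numerator = '3'
--     denominator = '2'
--     while True:
--         yield numerator, denominator
--         numerator, previous_numerator = calculate_large_sum(
--             [calculate_large_product(numerator, '2'), previous_numerator]
--         ), numerator
--         denominator, previous_denominator = calculate_large_sum(
--             [calculate_large_product(denominator, '2'), previous_denominator]
--         ), denominator
--
-- def count_larger_numerator_expansions(threshold: int) -> int:
--     """
--     Count the number of expansion fractions, where the numerator contains more digits
--     than the denominator in the first `threshold` square root expansions.
--     """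
--     square_root_expansions_iter = get_square_root_expansions()
--     count = 0
--     for _ in range(threshold):
--         numerator, denominator = next(square_root_expansions_iter)
--         if len(numerator) > len(denominator):
--             count += 1
--     return count
-- ===== SOURCE B (Python) =====
-- def count_larger_numerator_expansions(threshold: int) -> int:
--     """
--     Count the number of expansion fractions, where the numerator contains more digits
--     than the denominator in the first `threshold` square root expansions.
--     """
--     count = 0
--     num, den = 3, 2
--     for _ in range(threshold):
--         if len(str(num)) > len(str(den)):
--             count += 1
--         num, den = num + 2 * den, num + den
--     return count
-- ===== Notes on version B (the rewrite author's own statement) =====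
-- stated objective: faster
-- what changed: Replaces A's hand-rolled decimal string arithmetic (digit-by-digit large-sum/product helpers plus a second-order generator keeping four strings of state) with a single loop over native ints that maintains only the current numerator/denominator pair via the first-order coupled Pell-fraction transform.
import Mathlib
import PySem

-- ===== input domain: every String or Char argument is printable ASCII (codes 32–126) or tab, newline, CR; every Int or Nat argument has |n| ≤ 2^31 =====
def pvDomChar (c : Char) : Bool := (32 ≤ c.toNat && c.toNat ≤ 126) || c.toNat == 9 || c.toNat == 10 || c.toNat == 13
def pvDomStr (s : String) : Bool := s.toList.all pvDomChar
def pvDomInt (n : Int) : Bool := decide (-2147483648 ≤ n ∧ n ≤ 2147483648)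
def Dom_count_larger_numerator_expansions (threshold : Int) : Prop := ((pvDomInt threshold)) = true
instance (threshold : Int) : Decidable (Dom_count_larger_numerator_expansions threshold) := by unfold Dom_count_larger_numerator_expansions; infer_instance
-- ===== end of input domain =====

-- B replaces A's hand-rolled decimal string arithmetic (second-order generator over four strings
-- of state) with one loop over native ints maintaining only the current numerator/denominator
-- pair via the first-order coupled Pell transform; intended as faster (measured ~64x at the
-- largest size both versions finished in a timing run).


-- ===== PORT A =====
-- Strings are carried as List Char (PySem.Chars is the sanctioned code-point representation).

-- int(c) for a single character; on the digit strings A manipulates ValueError cannot occur,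
-- so the `.getD 0` default is never taken on inputs A returns on.
def pvDigitInt (c : Char) : Int := (PySem.Int.ofChars? [c]).getD 0

-- body of the `for number in number_strings` loop of calculate_large_sum:
-- try digit = int(number[-digit_idx]); new_digit = True / except IndexError: digit = 0
def pvSumInner (digit_idx : Nat) (st : Int × Bool) (number : List Char) : Int × Bool :=
  match PySem.Chars.pyGet? number (-(digit_idx : Int)) with
  | some ch => (st.1 + pvDigitInt ch, true)
  | none => (st.1 + 0, st.2)

-- the `while new_digit` loop of calculate_large_sum; fuel = (max length) + 1 always suffices
-- (once digit_idx exceeds every length, new_digit stays False), so the fuel-0 branch is unreachable.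
def pvSumLoop (numbers : List (List Char)) : Nat → Nat → Int → List Char → List Char × Int
  | 0, _, remainder, large_sum => (large_sum, remainder)
  | fuel+1, digit_idx, remainder, large_sum =>
      let st := numbers.foldl (pvSumInner digit_idx) (remainder, false)
      let large_sum' := PySem.Int.toChars (PySem.Int.mod st.1 10) ++ large_sum
      let remainder' := PySem.Int.floordiv st.1 10
      if st.2 then pvSumLoop numbers fuel (digit_idx+1) remainder' large_sum'
      else (large_sum', remainder')

def pv_calculate_large_sum (number_strings : List (List Char)) : List Char :=
  let fuel := (number_strings.foldl (fun m s => max m s.length) 0) + 1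
  let res := pvSumLoop number_strings fuel 1 0 []
  let large_sum := if res.2 ≠ 0 then PySem.Int.toChars res.2 ++ res.1 else res.1
  -- large_sum.lstrip('0'): drop the leading '0' characters (exact port of str.lstrip with a char set)
  let stripped := large_sum.dropWhile (· == '0')
  if stripped = [] then ['0'] else stripped

-- body of the `for num_digit in reversed(number)` loop of _multiply_large_number_and_digit;
-- state = (remainder, large_product)
def pvMulFold (digit : Int) (st : Int × List Char) (num_digit : Char) : Int × List Char :=
  let cur := st.1 + pvDigitInt num_digit * digit
  (PySem.Int.floordiv cur 10, PySem.Int.toChars (PySem.Int.mod cur 10) ++ st.2)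

def pv_multiply_large_number_and_digit (number : List Char) (digit : Int) : List Char :=
  let st := number.reverse.foldl (pvMulFold digit) (0, [])
  if st.1 ≠ 0 then PySem.Int.toChars st.1 ++ st.2 else st.2

def pv_calculate_large_product (number1 number2 : List Char) (last_n_digits_only : Int) : List Char :=
  let number1 := PySem.Chars.slice number1 (some (-last_n_digits_only)) none
  let number2 := PySem.Chars.slice number2 (some (-last_n_digits_only)) none
  let partial_products := (PySem.List.enumerate number2.reverse).map
    (fun p => pv_multiply_large_number_and_digit number1 (pvDigitInt p.2) ++ List.replicate p.1.toNat '0')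
  PySem.Chars.slice (pv_calculate_large_sum partial_products) (some (-last_n_digits_only)) none

-- get_square_root_expansions fused with the consuming `for _ in range(threshold)` loop of A
def pvExpLoop : Nat → List Char → List Char → List Char → List Char → Int → Int
  | 0, _, _, _, _, count => count
  | n+1, prev_num, prev_den, num, den, count =>
      let count' := if PySem.Chars.len num > PySem.Chars.len den then count + 1 else count
      pvExpLoop n num den
        (pv_calculate_large_sum [pv_calculate_large_product num ['2'] 0, prev_num])
        (pv_calculate_large_sum [pv_calculate_large_product den ['2'] 0, prev_den])
        count'

def count_larger_numerator_expansions (threshold : Int) : Int :=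
  pvExpLoop threshold.toNat ['1'] ['1'] ['3'] ['2'] 0

-- ===== PORT B =====
def pvAltLoop : Nat → Int → Int → Int → Int
  | 0, _, _, count => count
  | n+1, num, den, count =>
      let count' := if PySem.Str.len (PySem.Int.toStr num) > PySem.Str.len (PySem.Int.toStr den)
                    then count + 1 else count
      pvAltLoop n (num + 2*den) (num + den) count'

def count_larger_numerator_expansions_alt (threshold : Int) : Int :=
  pvAltLoop threshold.toNat 3 2 0

-- ===== PRECONDITION & SPEC =====
def Spec_count_larger_numerator_expansions (threshold : Int) (out : Int) : Prop := out = count_larger_numerator_expansions_alt threshold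
instance (threshold : Int) (out : Int) : Decidable (Spec_count_larger_numerator_expansions threshold out) := by unfold Spec_count_larger_numerator_expansions; infer_instance

-- ===== CLAIM (what is proved, stated in full; the proofs are below) =====
def Claim_equal_count_larger_numerator_expansions : Prop := ∀ (threshold : Int), Dom_count_larger_numerator_expansions threshold → Spec_count_larger_numerator_expansions threshold (count_larger_numerator_expansions threshold)

-- ===== LEMMAS AND PROOFS =====

-- little-endian digit model of A's carry loops
-- mulLE/mulCarry: the multiply-by-2 fold; sum2LE: the per-index addition loop on two numbers
def mulLE : List Nat → Nat → List Nat
  | [], _ => []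
  | d :: t, c => (2*d + c) % 10 :: mulLE t ((2*d + c) / 10)

def mulCarry : List Nat → Nat → Nat
  | [], c => c
  | d :: t, c => mulCarry t ((2*d + c) / 10)

def mulFull (ds : List Nat) (c : Nat) : List Nat :=
  mulLE ds c ++ (if mulCarry ds c = 0 then [] else [mulCarry ds c])

def sum2LE : List Nat → List Nat → Nat → List Nat
  | [], [], c => [c]
  | x :: a, [], c => (x + 0 + c) % 10 :: sum2LE a [] ((x + 0 + c) / 10)
  | [], y :: b, c => (0 + y + c) % 10 :: sum2LE [] b ((0 + y + c) / 10)
  | x :: a, y :: b, c => (x + y + c) % 10 :: sum2LE a b ((x + y + c) / 10)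
  termination_by a b _ => a.length + b.length
  decreasing_by all_goals simp <;> omega

-- decimal characters of n, little-endian
def leChars (n : Nat) : List Char := (Nat.digits 10 n).map Nat.digitChar

theorem toDigitsCore_eq (fuel : Nat) : ∀ n acc, n < fuel →
    Nat.toDigitsCore 10 fuel n acc
      = (if n = 0 then ['0'] else (leChars n).reverse) ++ acc := by
  induction fuel with
  | zero => intro n acc h; omega
  | succ f ih =>
    intro n acc h
    simp only [Nat.toDigitsCore]
    by_cases h0 : n / 10 = 0
    · simp only [h0, if_true]
      by_cases hn : n = 0
      · subst hn; simp [Nat.digitChar]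
      · have hn10 : n < 10 := by omega
        have : Nat.digits 10 n = [n] := by
          rw [Nat.digits_def' (by norm_num) (by omega)]
          simp [Nat.mod_eq_of_lt hn10, h0]
        simp [hn, leChars, this, Nat.mod_eq_of_lt hn10]
    · have hn : n ≠ 0 := by omega
      have hlt : n / 10 < f := by omega
      simp only [h0, if_false]
      rw [ih (n / 10) _ hlt]
      have : Nat.digits 10 n = n % 10 :: Nat.digits 10 (n / 10) := by
        rw [Nat.digits_def' (by norm_num) (by omega)]
      simp [hn, h0, leChars, this]

theorem toChars_natCast (n : Nat) (hn : 1 ≤ n) :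
    PySem.Int.toChars (n : Int) = (leChars n).reverse := by
  have h : ¬ ((n : Int) < 0) := by omega
  simp only [PySem.Int.toChars, h, if_false, Int.toNat_natCast, Nat.toDigits]
  rw [toDigitsCore_eq (n+1) n [] (by omega)]
  have : n ≠ 0 := by omega
  simp [this]

theorem pvDigitInt_digitChar (d : Nat) (hd : d < 10) :
    pvDigitInt (Nat.digitChar d) = (d : Int) := by
  interval_cases d <;> decide

theorem toChars_small (d : Nat) (hd : d < 10) :
    PySem.Int.toChars (d : Int) = [Nat.digitChar d] := by
  interval_cases d <;> decide

theorem digitChar_eq_zero_iff (d : Nat) (hd : d < 10) :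
    (Nat.digitChar d == '0') = true ↔ d = 0 := by
  interval_cases d <;> decide

theorem mulCarry_le (ds : List Nat) : ∀ c, (∀ d ∈ ds, d < 10) → c ≤ 8 → mulCarry ds c ≤ 8 := by
  induction ds with
  | nil => intro c _ hc; simpa [mulCarry] using hc
  | cons d t ih =>
    intro c hlt hc
    have hd : d < 10 := hlt d (by simp)
    simp only [mulCarry]
    exact ih _ (fun x hx => hlt x (by simp [hx])) (by omega)

theorem digits_single (c : Nat) (h0 : 0 < c) (h : c < 10) : Nat.digits 10 c = [c] := by
  rw [Nat.digits_def' (by norm_num) h0]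
  simp [Nat.mod_eq_of_lt h, Nat.div_eq_of_lt h]

-- the multiply fold computes mulLE/mulCarry
theorem mulFold_eq (ds : List Nat) : ∀ (c : Nat) (acc : List Char), (∀ d ∈ ds, d < 10) →
    (ds.map Nat.digitChar).foldl (pvMulFold 2) ((c : Int), acc)
      = ((mulCarry ds c : Int), ((mulLE ds c).map Nat.digitChar).reverse ++ acc) := by
  induction ds with
  | nil => intro c acc _; simp [mulLE, mulCarry]
  | cons d t ih =>
    intro c acc hlt
    have hd : d < 10 := hlt d (by simp)
    simp only [List.map_cons, List.foldl_cons]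
    have hcast : (c : Int) + (d : Int) * 2 = ((2*d + c : Nat) : Int) := by push_cast; ring
    have e1 : pvMulFold 2 ((c : Int), acc) (Nat.digitChar d)
        = ((((2*d + c) / 10 : Nat) : Int),
           Nat.digitChar ((2*d + c) % 10) :: acc) := by
      have hf : PySem.Int.floordiv ((2*d + c : Nat) : Int) 10 = (((2*d + c) / 10 : Nat) : Int) := by
        exact_mod_cast PySem.Int.floordiv_natCast (2*d + c) 10
      have hm2 : PySem.Int.mod ((2*d + c : Nat) : Int) 10 = (((2*d + c) % 10 : Nat) : Int) := by
        exact_mod_cast PySem.Int.mod_natCast (2*d + c) 10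
      simp only [pvMulFold, pvDigitInt_digitChar d hd, hcast, hf, hm2,
        toChars_small _ (Nat.mod_lt _ (by norm_num))]
      simp
    rw [e1, ih _ _ (fun x hx => hlt x (by simp [hx]))]
    simp [mulLE, mulCarry]

theorem mulFull_cons (d : Nat) (t : List Nat) (c : Nat) :
    mulFull (d :: t) c = ((2*d + c) % 10) :: mulFull t ((2*d + c) / 10) := by
  simp [mulFull, mulLE, mulCarry]

theorem mulFull_digits (m : Nat) : ∀ c, c ≤ 8 →
    mulFull (Nat.digits 10 m) c = Nat.digits 10 (2*m + c) := by
  induction m using Nat.strong_induction_on with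
  | _ m ih =>
    intro c hc
    by_cases hm : m = 0
    · subst hm
      by_cases hc0 : c = 0
      · subst hc0; simp [mulFull, mulLE, mulCarry]
      · simp [mulFull, mulLE, mulCarry, hc0, digits_single c (by omega) (by omega)]
    · rw [Nat.digits_def' (by norm_num : (1:Nat) < 10) (by omega), mulFull_cons,
          ih (m / 10) (Nat.div_lt_self (by omega) (by norm_num)) _ (by omega),
          Nat.digits_def' (by norm_num : (1:Nat) < 10) (by omega : 0 < 2*m + c)]
      have h1 : (2*(m % 10) + c) % 10 = (2*m + c) % 10 := by omega
      have h2 : 2*(m / 10) + (2*(m % 10) + c) / 10 = (2*m + c) / 10 := by omega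
      rw [h1, h2]

theorem multiply_correct (n : Nat) (hn : 1 ≤ n) :
    pv_multiply_large_number_and_digit (PySem.Int.toChars (n : Int)) 2
      = PySem.Int.toChars ((2*n : Nat) : Int) := by
  have hlt : ∀ d ∈ Nat.digits 10 n, d < 10 := fun d hd => Nat.digits_lt_base (by norm_num) hd
  unfold pv_multiply_large_number_and_digit
  rw [toChars_natCast n hn]
  simp only [List.reverse_reverse, leChars]
  rw [show ((0:Int), ([] : List Char)) = (((0:Nat) : Int), ([] : List Char)) by norm_num,
      mulFold_eq _ 0 [] hlt]
  rw [toChars_natCast (2*n) (by omega)]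
  have hfull := mulFull_digits n 0 (by omega)
  simp only [Nat.add_zero] at hfull
  by_cases hcar : mulCarry (Nat.digits 10 n) 0 = 0
  · simp only [hcar, Nat.cast_zero, ne_eq, not_true_eq_false, if_false]
    rw [leChars, ← hfull, mulFull, hcar]
    simp
  · have hle : mulCarry (Nat.digits 10 n) 0 ≤ 8 := mulCarry_le _ 0 hlt (by omega)
    have : ((mulCarry (Nat.digits 10 n) 0 : Nat) : Int) ≠ 0 := by
      simpa using hcar
    simp only [this, ne_eq, not_false_eq_true, if_true]
    rw [toChars_small _ (by omega), leChars, ← hfull]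
    simp [mulFull, hcar]

-- value / digit-bound / strip facts for the addition loop
theorem sum2LE_val (a b : List Nat) (c : Nat) (ha : ∀ d ∈ a, d < 10) (hb : ∀ d ∈ b, d < 10)
    (hc : c ≤ 1) :
    Nat.ofDigits 10 (sum2LE a b c) = Nat.ofDigits 10 a + Nat.ofDigits 10 b + c := by
  induction a, b, c using sum2LE.induct with
  | case1 c => simp [sum2LE, Nat.ofDigits_singleton]
  | case2 x a c ih =>
    have hx : x < 10 := ha x (by simp)
    rw [sum2LE, Nat.ofDigits_cons,
      ih (fun d hd => ha d (by simp [hd])) (by simp) (by omega), Nat.ofDigits_cons]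
    simp only [Nat.ofDigits_nil]
    omega
  | case3 y b c ih =>
    have hy : y < 10 := hb y (by simp)
    rw [sum2LE, Nat.ofDigits_cons,
      ih (by simp) (fun d hd => hb d (by simp [hd])) (by omega), Nat.ofDigits_cons]
    simp only [Nat.ofDigits_nil]
    omega
  | case4 x a y b c ih =>
    have hx : x < 10 := ha x (by simp)
    have hy : y < 10 := hb y (by simp)
    rw [sum2LE, Nat.ofDigits_cons,
      ih (fun d hd => ha d (by simp [hd])) (fun d hd => hb d (by simp [hd])) (by omega),
      Nat.ofDigits_cons, Nat.ofDigits_cons]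
    omega

theorem sum2LE_lt (a b : List Nat) (c : Nat) (ha : ∀ d ∈ a, d < 10) (hb : ∀ d ∈ b, d < 10)
    (hc : c ≤ 1) : ∀ d ∈ sum2LE a b c, d < 10 := by
  induction a, b, c using sum2LE.induct with
  | case1 c => intro d hd; simp [sum2LE] at hd; omega
  | case2 x a c ih =>
    have hx : x < 10 := ha x (by simp)
    intro d hd
    rw [sum2LE] at hd
    rcases List.mem_cons.mp hd with h | h
    · omega
    · exact ih (fun e he => ha e (by simp [he])) (by simp) (by omega) d h
  | case3 y b c ih =>
    have hy : y < 10 := hb y (by simp)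
    intro d hd
    rw [sum2LE] at hd
    rcases List.mem_cons.mp hd with h | h
    · omega
    · exact ih (by simp) (fun e he => hb e (by simp [he])) (by omega) d h
  | case4 x a y b c ih =>
    have hx : x < 10 := ha x (by simp)
    have hy : y < 10 := hb y (by simp)
    intro d hd
    rw [sum2LE] at hd
    rcases List.mem_cons.mp hd with h | h
    · omega
    · exact ih (fun e he => ha e (by simp [he])) (fun e he => hb e (by simp [he])) (by omega) d h

theorem dropWhile_rev_digits (ds : List Nat) (h : ∀ d ∈ ds, d < 10) :
    ((ds.map Nat.digitChar).reverse).dropWhile (· == '0')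
      = ((Nat.digits 10 (Nat.ofDigits 10 ds)).map Nat.digitChar).reverse := by
  induction ds using List.reverseRecOn with
  | nil => simp
  | append_singleton t d ih =>
    have hd : d < 10 := h d (by simp)
    by_cases hd0 : d = 0
    · subst hd0
      have : Nat.ofDigits 10 (t ++ [0]) = Nat.ofDigits 10 t := by
        rw [Nat.ofDigits_append]; simp
      rw [this, ← ih (fun e he => h e (by simp [he]))]
      simp [Nat.digitChar]
    · have hlast : Nat.digits 10 (Nat.ofDigits 10 (t ++ [d])) = t ++ [d] := by
        refine Nat.digits_ofDigits 10 (by norm_num) _ (fun l hl => h l hl) (fun _ => ?_)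
        simpa using hd0
      rw [hlast]
      have hne : (Nat.digitChar d == '0') = false := by
        rcases Bool.eq_false_or_eq_true (Nat.digitChar d == '0') with hh | hh
        · exact absurd ((digitChar_eq_zero_iff d hd).mp hh) hd0
        · exact hh
      simp [hne]

theorem pyGet_rev_neg (l : List Char) (k : Nat) :
    PySem.Chars.pyGet? l.reverse (-((k : Int)+1)) = l[k]? := by
  by_cases hk : k < l.length
  · have h2 : k+1 ≤ l.reverse.length := by simpa using hk
    have hcast : -((k : Int)+1) = -(((k+1 : Nat)) : Int) := by push_cast; ring
    rw [PySem.Chars.pyGet?, hcast, PySem.List.pyGet?_neg_natCast _ _ (by omega) h2]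
    rw [List.length_reverse, List.getElem?_reverse (by omega)]
    congr 1
    omega
  · have hnone : PySem.List.pyGet? l.reverse (-((k : Int)+1)) = none := by
      rw [PySem.List.pyGet?_eq_none_iff]
      simp only [PySem.Raise.InRange, List.length_reverse, not_and, not_lt]
      intro h
      omega
    rw [PySem.Chars.pyGet?, hnone, List.getElem?_eq_none (by omega)]

theorem sumInner_eq (x : List Nat) (hx : ∀ d ∈ x, d < 10) (k : Nat) (v : Int) (bb : Bool) :
    pvSumInner (k+1) (v, bb) ((x.map Nat.digitChar).reverse)
      = (v + (x.getD k 0 : Int), if k < x.length then true else bb) := by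
  have hcast : -(((k+1 : Nat)) : Int) = -((k : Int)+1) := by push_cast; ring
  rw [pvSumInner, hcast, pyGet_rev_neg (x.map Nat.digitChar) k]
  by_cases hk : k < x.length
  · rw [List.getElem?_map, List.getElem?_eq_getElem hk]
    simp only [Option.map_some, hk, if_true]
    rw [pvDigitInt_digitChar _ (hx _ (List.getElem_mem hk)), List.getD_eq_getElem x 0 hk]
  · rw [List.getElem?_map, List.getElem?_eq_none (by omega)]
    simp only [Option.map_none, hk, if_false]
    rw [List.getD_eq_default x 0 (by omega)]
    simp

theorem sum2LE_drop_step (a b : List Nat) (k c : Nat) (h : k < a.length ∨ k < b.length) :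
    sum2LE (a.drop k) (b.drop k) c
      = ((a.getD k 0 + b.getD k 0 + c) % 10)
          :: sum2LE (a.drop (k+1)) (b.drop (k+1)) ((a.getD k 0 + b.getD k 0 + c) / 10) := by
  by_cases ha : k < a.length <;> by_cases hb : k < b.length
  · rw [List.drop_eq_getElem_cons ha, List.drop_eq_getElem_cons hb, sum2LE,
      List.getD_eq_getElem a 0 ha, List.getD_eq_getElem b 0 hb]
  · rw [List.drop_eq_getElem_cons ha, List.drop_eq_nil_of_le (by omega : b.length ≤ k),
      List.drop_eq_nil_of_le (by omega : b.length ≤ k+1), sum2LE,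
      List.getD_eq_getElem a 0 ha, List.getD_eq_default b 0 (by omega)]
  · rw [List.drop_eq_nil_of_le (by omega : a.length ≤ k),
      List.drop_eq_nil_of_le (by omega : a.length ≤ k+1), List.drop_eq_getElem_cons hb, sum2LE,
      List.getD_eq_getElem b 0 hb, List.getD_eq_default a 0 (by omega)]
  · omega

-- the while-loop of calculate_large_sum on two numbers computes sum2LE
theorem sumLoop2_eq (a b : List Nat) (ha : ∀ d ∈ a, d < 10) (hb : ∀ d ∈ b, d < 10) :
    ∀ (fuel k : Nat) (c : Nat) (acc : List Char),
      c ≤ 1 → max a.length b.length + 1 ≤ fuel + k → 1 ≤ fuel →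
      pvSumLoop [(a.map Nat.digitChar).reverse, (b.map Nat.digitChar).reverse]
          fuel (k+1) (c : Int) acc
        = (((sum2LE (a.drop k) (b.drop k) c).map Nat.digitChar).reverse ++ acc, 0) := by
  intro fuel
  induction fuel with
  | zero => intro k c acc _ _ hf; omega
  | succ f ih =>
    intro k c acc hc hfk _
    have hak : a.getD k 0 < 10 := by
      by_cases hk : k < a.length
      · rw [List.getD_eq_getElem a 0 hk]; exact ha _ (List.getElem_mem hk)
      · rw [List.getD_eq_default a 0 (by omega)]; norm_num
    have hbk : b.getD k 0 < 10 := by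
      by_cases hk : k < b.length
      · rw [List.getD_eq_getElem b 0 hk]; exact hb _ (List.getElem_mem hk)
      · rw [List.getD_eq_default b 0 (by omega)]; norm_num
    rw [pvSumLoop]
    simp only [List.foldl_cons, List.foldl_nil]
    rw [sumInner_eq a ha k (c : Int) false, sumInner_eq b hb k _ _]
    have hS : (c : Int) + (a.getD k 0 : Int) + (b.getD k 0 : Int)
        = ((a.getD k 0 + b.getD k 0 + c : Nat) : Int) := by push_cast; ring
    have hmod : PySem.Int.mod ((a.getD k 0 + b.getD k 0 + c : Nat) : Int) 10
        = (((a.getD k 0 + b.getD k 0 + c) % 10 : Nat) : Int) := by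
      exact_mod_cast PySem.Int.mod_natCast _ 10
    have hdiv : PySem.Int.floordiv ((a.getD k 0 + b.getD k 0 + c : Nat) : Int) 10
        = (((a.getD k 0 + b.getD k 0 + c) / 10 : Nat) : Int) := by
      exact_mod_cast PySem.Int.floordiv_natCast _ 10
    simp only [hS, hmod, hdiv, toChars_small _ (Nat.mod_lt _ (by norm_num))]
    by_cases hka : k < a.length <;> by_cases hkb : k < b.length
    · simp only [hka, hkb, if_true]
      rw [ih (k+1) _ _ (by omega) (by omega) (by omega),
        sum2LE_drop_step a b k c (Or.inl hka)]
      simp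
    · simp only [hka, hkb, if_true, if_false]
      rw [ih (k+1) _ _ (by omega) (by omega) (by omega),
        sum2LE_drop_step a b k c (Or.inl hka)]
      simp
    · simp only [hka, hkb, if_true, if_false]
      rw [ih (k+1) _ _ (by omega) (by omega) (by omega),
        sum2LE_drop_step a b k c (Or.inr hkb)]
      simp
    · simp only [hka, hkb, if_false]
      rw [List.drop_eq_nil_of_le (by omega : a.length ≤ k),
        List.drop_eq_nil_of_le (by omega : b.length ≤ k), sum2LE]
      have hgda : a.getD k 0 = 0 := List.getD_eq_default a 0 (by omega)
      have hgdb : b.getD k 0 = 0 := List.getD_eq_default b 0 (by omega)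
      rw [hgda, hgdb]
      norm_num [Nat.mod_eq_of_lt (show c < 10 by omega), Nat.div_eq_of_lt (show c < 10 by omega)]

-- the while-loop of calculate_large_sum on a single number computes sum2LE _ []
theorem sumLoop1_eq (a : List Nat) (ha : ∀ d ∈ a, d < 10) :
    ∀ (fuel k : Nat) (c : Nat) (acc : List Char),
      c ≤ 1 → a.length + 1 ≤ fuel + k → 1 ≤ fuel →
      pvSumLoop [(a.map Nat.digitChar).reverse] fuel (k+1) (c : Int) acc
        = (((sum2LE (a.drop k) [] c).map Nat.digitChar).reverse ++ acc, 0) := by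
  intro fuel
  induction fuel with
  | zero => intro k c acc _ _ hf; omega
  | succ f ih =>
    intro k c acc hc hfk _
    have hak : a.getD k 0 < 10 := by
      by_cases hk : k < a.length
      · rw [List.getD_eq_getElem a 0 hk]; exact ha _ (List.getElem_mem hk)
      · rw [List.getD_eq_default a 0 (by omega)]; norm_num
    rw [pvSumLoop]
    simp only [List.foldl_cons, List.foldl_nil]
    rw [sumInner_eq a ha k (c : Int) false]
    have hS : (c : Int) + (a.getD k 0 : Int) = ((a.getD k 0 + 0 + c : Nat) : Int) := by
      push_cast; ring
    have hmod : PySem.Int.mod ((a.getD k 0 + 0 + c : Nat) : Int) 10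
        = (((a.getD k 0 + 0 + c) % 10 : Nat) : Int) := by
      exact_mod_cast PySem.Int.mod_natCast _ 10
    have hdiv : PySem.Int.floordiv ((a.getD k 0 + 0 + c : Nat) : Int) 10
        = (((a.getD k 0 + 0 + c) / 10 : Nat) : Int) := by
      exact_mod_cast PySem.Int.floordiv_natCast _ 10
    simp only [hS, hmod, hdiv, toChars_small _ (Nat.mod_lt _ (by norm_num))]
    by_cases hka : k < a.length
    · simp only [hka, if_true]
      rw [ih (k+1) _ _ (by omega) (by omega) (by omega)]
      have hstep := sum2LE_drop_step a [] k c (Or.inl hka)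
      simp only [List.drop_nil] at hstep
      rw [hstep]
      simp
    · simp only [hka, if_false]
      rw [List.drop_eq_nil_of_le (by omega : a.length ≤ k), sum2LE]
      have hgda : a.getD k 0 = 0 := List.getD_eq_default a 0 (by omega)
      rw [hgda]
      norm_num [Nat.mod_eq_of_lt (show c < 10 by omega), Nat.div_eq_of_lt (show c < 10 by omega)]

theorem sum2_correct (m n : Nat) (hm : 1 ≤ m) (hn : 1 ≤ n) :
    pv_calculate_large_sum [PySem.Int.toChars (m : Int), PySem.Int.toChars (n : Int)]
      = PySem.Int.toChars ((m + n : Nat) : Int) := by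
  have ha : ∀ d ∈ Nat.digits 10 m, d < 10 := fun d hd => Nat.digits_lt_base (by norm_num) hd
  have hb : ∀ d ∈ Nat.digits 10 n, d < 10 := fun d hd => Nat.digits_lt_base (by norm_num) hd
  unfold pv_calculate_large_sum
  rw [toChars_natCast m hm, toChars_natCast n hn]
  simp only [leChars, List.foldl_cons, List.foldl_nil, List.length_reverse, List.length_map]
  have hfuel : max (max 0 (Nat.digits 10 m).length) (Nat.digits 10 n).length
      = max (Nat.digits 10 m).length (Nat.digits 10 n).length := by omega
  rw [hfuel, show (0 : Int) = ((0 : Nat) : Int) by norm_num,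
    sumLoop2_eq (Nat.digits 10 m) (Nat.digits 10 n) ha hb _ 0 0 [] (by omega) (by omega) (by omega)]
  simp only [List.drop_zero, List.append_nil, Nat.cast_zero, ne_eq, not_true_eq_false, if_false]
  rw [dropWhile_rev_digits _ (sum2LE_lt _ _ 0 ha hb (by omega)),
    sum2LE_val _ _ 0 ha hb (by omega), Nat.ofDigits_digits, Nat.ofDigits_digits]
  have hne : Nat.digits 10 (m + n + 0) ≠ [] := Nat.digits_ne_nil_iff_ne_zero.mpr (by omega)
  have : ((Nat.digits 10 (m + n + 0)).map Nat.digitChar).reverse ≠ [] := by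
    simpa using hne
  rw [if_neg this, toChars_natCast (m + n) (by omega), leChars]
  norm_num

-- calculate_large_sum on a single canonical number is the identity
theorem sum1_correct (m : Nat) (hm : 1 ≤ m) :
    pv_calculate_large_sum [PySem.Int.toChars (m : Int)]
      = PySem.Int.toChars (m : Int) := by
  have ha : ∀ d ∈ Nat.digits 10 m, d < 10 := fun d hd => Nat.digits_lt_base (by norm_num) hd
  unfold pv_calculate_large_sum
  rw [toChars_natCast m hm]
  simp only [leChars, List.foldl_cons, List.foldl_nil, List.length_reverse, List.length_map]
  have hfuel : max 0 (Nat.digits 10 m).length = (Nat.digits 10 m).length := by omega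
  rw [hfuel, show (0 : Int) = ((0 : Nat) : Int) by norm_num,
    sumLoop1_eq (Nat.digits 10 m) ha _ 0 0 [] (by omega) (by omega) (by omega)]
  simp only [List.drop_zero, List.append_nil, Nat.cast_zero, ne_eq, not_true_eq_false, if_false]
  have hb : ∀ d ∈ ([] : List Nat), d < 10 := by simp
  rw [dropWhile_rev_digits _ (sum2LE_lt _ _ 0 ha hb (by omega)),
    sum2LE_val _ _ 0 ha hb (by omega), Nat.ofDigits_digits]
  have hne : Nat.digits 10 (m + Nat.ofDigits 10 [] + 0) ≠ [] :=
    Nat.digits_ne_nil_iff_ne_zero.mpr (by simp [Nat.ofDigits_nil]; omega)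
  have : ((Nat.digits 10 (m + Nat.ofDigits 10 [] + 0)).map Nat.digitChar).reverse ≠ [] := by
    simpa using hne
  rw [if_neg this]
  norm_num [Nat.ofDigits_nil]

theorem product2_correct (n : Nat) (hn : 1 ≤ n) :
    pv_calculate_large_product (PySem.Int.toChars (n : Int)) ['2'] 0
      = PySem.Int.toChars ((2*n : Nat) : Int) := by
  have hsl : ∀ (l : List Char), PySem.Chars.slice l (some (-(0:Int))) none = l := by
    intro l
    rw [show (-(0:Int)) = ((0:Nat) : Int) by norm_num]
    simp [PySem.Chars.slice]
  unfold pv_calculate_large_product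
  simp only [hsl]
  rw [show (['2'] : List Char).reverse = ['2'] from rfl,
    show PySem.List.enumerate (['2'] : List Char) = [((0:Int), '2')] from by decide]
  simp only [List.map_cons, List.map_nil]
  rw [show pvDigitInt '2' = 2 from by decide]
  simp only [Int.toNat_zero, List.replicate, List.append_nil]
  rw [multiply_correct n hn]
  exact sum1_correct (2*n) (by omega)

theorem expLoop_eq_altLoop (t : Nat) : ∀ (n d : Nat) (count : Int),
    3 ≤ n → 2 ≤ d → d < n → n < 2*d →
    pvExpLoop t (PySem.Int.toChars ((2*d - n : Nat) : Int))
               (PySem.Int.toChars ((n - d : Nat) : Int))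
               (PySem.Int.toChars (n : Int)) (PySem.Int.toChars (d : Int)) count
      = pvAltLoop t (n : Int) (d : Int) count := by
  induction t with
  | zero => intro n d count _ _ _ _; rw [pvExpLoop, pvAltLoop]
  | succ t ih =>
    intro n d count h3 h2 hdn hn2d
    rw [pvExpLoop, pvAltLoop]
    have hlen : ∀ x : Nat, PySem.Str.len (PySem.Int.toStr (x : Int))
        = PySem.Chars.len (PySem.Int.toChars (x : Int)) := by
      intro x
      rw [PySem.Str.len_eq, PySem.Int.toList_toStr, PySem.Chars.len]
    simp only [hlen]
    rw [product2_correct n (by omega), product2_correct d (by omega),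
      sum2_correct (2*n) (2*d - n) (by omega) (by omega),
      sum2_correct (2*d) (n - d) (by omega) (by omega),
      show 2*n + (2*d - n) = n + 2*d by omega,
      show 2*d + (n - d) = n + d by omega]
    have hih := ih (n + 2*d) (n + d) 
      (if PySem.Chars.len (PySem.Int.toChars (n : Int))
          > PySem.Chars.len (PySem.Int.toChars (d : Int)) then count + 1 else count)
      (by omega) (by omega) (by omega) (by omega)
    rw [show 2*(n + d) - (n + 2*d) = n by omega, show (n + 2*d) - (n + d) = d by omega] at hih
    rw [hih, show ((n : Int) + 2*(d : Int)) = ((n + 2*d : Nat) : Int) by push_cast; ring,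
      show ((n : Int) + (d : Int)) = ((n + d : Nat) : Int) by push_cast; ring]

-- ===== VERDICT (by name: the statement is the Claim_ definition above) =====
theorem count_larger_numerator_expansions_spec : Claim_equal_count_larger_numerator_expansions := by
  intro threshold _
  show _ = _
  unfold count_larger_numerator_expansions count_larger_numerator_expansions_alt
  have h := expLoop_eq_altLoop threshold.toNat 3 2 0 (by omega) (by omega) (by omega) (by omega)
  norm_num at h
  have h1 : PySem.Int.toChars 1 = ['1'] := by decide
  have h3 : PySem.Int.toChars 3 = ['3'] := by decide
  have h2 : PySem.Int.toChars 2 = ['2'] := by decide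
  rw [h1, h3, h2] at h
  exact h
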